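-- pv_equiv track=rewrite | github.com/casilllasRd/AdventOfCode2023 | day7/solution2.py | compare_hand_type
-- ===== SOURCE A (Python) =====
-- def compare_hand_type(possible_hands: list[str]) -> str:
--     FIVE_OF_A_KIND: tuple[str, int] = "FIVE", 7
--     FOUR_OF_A_KIND: tuple[str, int] = "FOUR", 6
--     FULL_HOUSE: tuple[str, int] = "FULL HOUSE", 5
--     THREE_OF_A_KIND: tuple[str, int] = "THREE", 4
--     TWO_PAIR: tuple[str, int] = "TWO", 3
--     ONE_PAIR: tuple[str, int] = "ONE", 2
--     HIGH_PAIR: tuple[str, int] = "HIGH CARD", 1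
--
--     current_best_hand: tuple[str, int] = "", 0
--
--     for hand in possible_hands:
--         hand_counts: list[tuple[str, int]] = sorted(
--             list(set([(card, hand.count(card)) for card in hand])),
--             key=lambda card: card[1],
--             reverse=True
--         )
--         highest_card_count = hand_counts[0][1]
--
--         if len(hand_counts) == 1:
--                current_best_hand = FIVE_OF_A_KIND if current_best_hand[1] <= FIVE_OF_A_KIND[1] else current_best_hand
--
--
--         elif len(hand_counts) == 2:
--             if highest_card_count == 4:
--                 current_best_hand = FOUR_OF_A_KIND if current_best_hand[1] <= FOUR_OF_A_KIND[1] else current_best_hand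
--             elif highest_card_count == 3:
--                 current_best_hand = FULL_HOUSE if current_best_hand[1] <= FULL_HOUSE[1] else current_best_hand
--
--         elif len(hand_counts) == 3:
--             if highest_card_count == 3:
--                 current_best_hand = THREE_OF_A_KIND if current_best_hand[1] <= THREE_OF_A_KIND[1] else current_best_hand
--             elif highest_card_count == 2:
--                 current_best_hand = TWO_PAIR if current_best_hand[1] <= TWO_PAIR[1] else current_best_hand
--
--         elif len(hand_counts) == 4:
--             current_best_hand = ONE_PAIR if current_best_hand[1] <= ONE_PAIR[1] else current_best_hand
--
--         elif len(hand_counts) == 5: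
--             current_best_hand = HIGH_PAIR if current_best_hand[1] <= HIGH_PAIR[1] else current_best_hand
--
--     return current_best_hand[0]
-- ===== SOURCE B (Python) =====
-- def compare_hand_type(possible_hands: list[str]) -> str:
--     # Pass 1: collect the set of hand "shapes" (distinct-card count, max multiplicity).
--     shapes = set()
--     for hand in possible_hands:
--         cards = set(hand)
--         shapes.add((len(cards), max(hand.count(card) for card in cards)))
--     # Pass 2: scan a strength-ordered table of hand types; return the first one matched.
--     for name, n, m in [("FIVE", 1, None), ("FOUR", 2, 4), ("FULL HOUSE", 2, 3),
--                        ("THREE", 3, 3), ("TWO", 3, 2), ("ONE", 4, None), ("HIGH CARD", 5, None)]: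
--         if any(sn == n and (m is None or sm == m) for sn, sm in shapes):
--             return name
--     return ""
-- ===== Notes on version B (the rewrite author's own statement) =====
-- stated objective: alternative
-- what changed: B replaces A's single fold with a running best (name, rank) tuple and a per-hand sorted count-pair branch ladder by two staged passes: first collect the set of (distinct-card count, max multiplicity) shapes, then scan a strength-ordered table of the seven hand types and return the first type any shape matches (early return, no ranks, no accumulator).
import Mathlib
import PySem

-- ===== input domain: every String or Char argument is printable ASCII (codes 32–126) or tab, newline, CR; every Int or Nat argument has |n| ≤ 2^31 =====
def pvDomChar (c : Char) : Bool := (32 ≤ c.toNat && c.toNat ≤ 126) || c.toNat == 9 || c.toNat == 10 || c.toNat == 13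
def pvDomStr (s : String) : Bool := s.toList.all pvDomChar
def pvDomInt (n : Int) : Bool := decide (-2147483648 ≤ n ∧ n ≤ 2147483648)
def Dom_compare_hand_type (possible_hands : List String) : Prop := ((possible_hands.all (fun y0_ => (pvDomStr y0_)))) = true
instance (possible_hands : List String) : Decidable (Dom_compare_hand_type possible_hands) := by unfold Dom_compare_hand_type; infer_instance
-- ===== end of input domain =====

-- B replaces A's single fold with a running best (name, rank) tuple and per-hand branch
-- ladder by two staged passes: collect the set of (distinct-count, max-multiplicity)
-- shapes, then scan a strength-ordered type table and return the first type matched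
-- (objective: alternative; same cost).

-- shared helper: Python's `hand.count(card)` for a single character `card` (both sources use it)
def pvCnt (hand : String) (card : Char) : Int :=
  (PySem.Str.count hand (String.ofList [card]) : Int)

-- ===== PORT A =====
-- the loop body of A's `for hand in possible_hands`
def pvStepA (current_best_hand : String × Int) (hand : String) : String × Int :=
  let hand_counts : List (Char × Int) :=
    PySem.List.sorted
      (PySem.Set.ofList (hand.toList.map (fun card => (card, pvCnt hand card))))
      (fun card => card.2) true
  -- `hand_counts[0][1]`: Python raises IndexError on an empty hand; such inputs are outside Pre_
  let highest_card_count : Int := (PySem.List.pyGetD hand_counts 0 ('?', 0)).2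
  if hand_counts.length = 1 then
    (if current_best_hand.2 ≤ 7 then ("FIVE", (7 : Int)) else current_best_hand)
  else if hand_counts.length = 2 then
    (if highest_card_count = 4 then
      (if current_best_hand.2 ≤ 6 then ("FOUR", (6 : Int)) else current_best_hand)
     else if highest_card_count = 3 then
      (if current_best_hand.2 ≤ 5 then ("FULL HOUSE", (5 : Int)) else current_best_hand)
     else current_best_hand)
  else if hand_counts.length = 3 then
    (if highest_card_count = 3 then
      (if current_best_hand.2 ≤ 4 then ("THREE", (4 : Int)) else current_best_hand)
     else if highest_card_count = 2 then
      (if current_best_hand.2 ≤ 3 then ("TWO", (3 : Int)) else current_best_hand)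
     else current_best_hand)
  else if hand_counts.length = 4 then
    (if current_best_hand.2 ≤ 2 then ("ONE", (2 : Int)) else current_best_hand)
  else if hand_counts.length = 5 then
    (if current_best_hand.2 ≤ 1 then ("HIGH CARD", (1 : Int)) else current_best_hand)
  else current_best_hand

def compare_hand_type (possible_hands : List String) : String :=
  (possible_hands.foldl pvStepA ("", 0)).1

-- ===== PORT B =====
-- B's shape of a hand: (number of distinct cards, maximal multiplicity)
def pvShape (hand : String) : Int × Int :=
  let cards : List Char := PySem.Set.ofList hand.toList
  -- `max(hand.count(card) for card in cards)`: Python raises ValueError on an empty hand; outside Pre_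
  (((cards.length : Int)),
   (PySem.List.max? (cards.map (fun card => pvCnt hand card)) (fun x => x)).getD 0)

-- B's strength-ordered table of the seven hand types: (name, distinct count, required max multiplicity)
def pvTable : List (String × Int × Option Int) :=
  [("FIVE", 1, none), ("FOUR", 2, some 4), ("FULL HOUSE", 2, some 3),
   ("THREE", 3, some 3), ("TWO", 3, some 2), ("ONE", 4, none), ("HIGH CARD", 5, none)]

-- B's `any(sn == n and (m is None or sm == m) for sn, sm in shapes)`
def pvMatch (shapes : List (Int × Int)) (n : Int) (m : Option Int) : Bool :=
  shapes.any (fun s => s.1 == n && (m.isNone || m == some s.2))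

-- B's second loop: scan the table, early-return the first matched name
def pvScan (shapes : List (Int × Int)) : List (String × Int × Option Int) → String
  | [] => ""
  | (name, n, m) :: rest => if pvMatch shapes n m then name else pvScan shapes rest

def compare_hand_type_alt (possible_hands : List String) : String :=
  pvScan (possible_hands.foldl (fun shapes hand => PySem.Set.add shapes (pvShape hand)) []) pvTable

-- ===== PRECONDITION & SPEC =====
-- Pre_ excludes lists containing an empty-string hand: there A's `hand_counts[0]`
-- raises IndexError (and B's `max` over the empty card set raises ValueError).
def Pre_compare_hand_type (possible_hands : List String) : Prop :=
  ∀ hand ∈ possible_hands, hand ≠ ""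
instance (possible_hands : List String) : Decidable (Pre_compare_hand_type possible_hands) := by unfold Pre_compare_hand_type; infer_instance

def pvWitness_compare_hand_type : List String := ["AABBC", "32T3K", "AAAAA"]

def Spec_compare_hand_type (possible_hands : List String) (out : String) : Prop := out = compare_hand_type_alt possible_hands
instance (possible_hands : List String) (out : String) : Decidable (Spec_compare_hand_type possible_hands out) := by unfold Spec_compare_hand_type; infer_instance

-- ===== CLAIM (what is proved, stated in full; the proofs are below) =====
def Claim_equal_compare_hand_type : Prop := ∀ (possible_hands : List String), Dom_compare_hand_type possible_hands → Pre_compare_hand_type possible_hands → Spec_compare_hand_type possible_hands (compare_hand_type possible_hands)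

-- ===== LEMMAS AND PROOFS =====

-- the numeric rank B's table order encodes for a shape (proof-side only)
def shapeRank (s : Int × Int) : Int :=
  if s.1 = 1 then 7
  else if s.1 = 2 then (if s.2 = 4 then 6 else if s.2 = 3 then 5 else 0)
  else if s.1 = 3 then (if s.2 = 3 then 4 else if s.2 = 2 then 3 else 0)
  else if s.1 = 4 then 2
  else if s.1 = 5 then 1
  else 0

def pvRank (hand : String) : Int := shapeRank (pvShape hand)

-- the hand-type name A pairs with each rank value
def pvName (r : Int) : String :=
  if r = 7 then "FIVE" else if r = 6 then "FOUR" else if r = 5 then "FULL HOUSE"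
  else if r = 4 then "THREE" else if r = 3 then "TWO" else if r = 2 then "ONE"
  else if r = 1 then "HIGH CARD" else ""

-- `set` of pairs `(card, count)` is the image under an injective map of `set(hand)`
theorem pv_foldl_add_map (hand : String) : ∀ (l : List Char) (s : List (Char × Int)) (s0 : List Char),
    s = s0.map (fun card => (card, pvCnt hand card)) →
    List.foldl PySem.Set.add s (l.map (fun card => (card, pvCnt hand card))) =
      (List.foldl PySem.Set.add s0 l).map (fun card => (card, pvCnt hand card)) := by
  intro l
  induction l with
  | nil => intro s s0 hs; simp [hs]
  | cons x t ih =>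
    intro s s0 hs
    simp only [List.map_cons, List.foldl_cons]
    apply ih
    subst hs
    unfold PySem.Set.add PySem.Set.contains
    have hmem : ((x, pvCnt hand x) ∈ s0.map (fun card => (card, pvCnt hand card))) ↔ x ∈ s0 := by
      constructor
      · intro hx
        rcases List.mem_map.mp hx with ⟨a, ha, heq⟩
        have : a = x := congrArg Prod.fst heq
        exact this ▸ ha
      · intro hx
        exact List.mem_map.mpr ⟨x, hx, rfl⟩
    by_cases hx : x ∈ s0
    · rw [if_pos (by rw [List.contains_eq_mem, decide_eq_true_iff]; exact hmem.mpr hx),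
          if_pos (by rw [List.contains_eq_mem]; exact decide_eq_true hx)]
    · rw [if_neg (by rw [List.contains_eq_mem, decide_eq_true_iff]; exact fun hmm => hx (hmem.mp hmm)),
          if_neg (by rw [List.contains_eq_mem, decide_eq_true_iff]; exact hx), List.map_append]
      rfl

theorem pv_set_map (hand : String) (l : List Char) :
    PySem.Set.ofList (l.map (fun card => (card, pvCnt hand card))) =
      (PySem.Set.ofList l).map (fun card => (card, pvCnt hand card)) := by
  unfold PySem.Set.ofList
  exact pv_foldl_add_map hand l _ _ rfl

-- A's loop body as a pure function of the sorted list's length and top count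
def pvStepFn (best : String × Int) (L : Nat) (hc : Int) : String × Int :=
  if L = 1 then (if best.2 ≤ 7 then ("FIVE", (7 : Int)) else best)
  else if L = 2 then
    (if hc = 4 then (if best.2 ≤ 6 then ("FOUR", (6 : Int)) else best)
     else if hc = 3 then (if best.2 ≤ 5 then ("FULL HOUSE", (5 : Int)) else best)
     else best)
  else if L = 3 then
    (if hc = 3 then (if best.2 ≤ 4 then ("THREE", (4 : Int)) else best)
     else if hc = 2 then (if best.2 ≤ 3 then ("TWO", (3 : Int)) else best)
     else best)
  else if L = 4 then (if best.2 ≤ 2 then ("ONE", (2 : Int)) else best)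
  else if L = 5 then (if best.2 ≤ 1 then ("HIGH CARD", (1 : Int)) else best)
  else best

theorem pvStepA_eq_fn (best : String × Int) (hand : String) :
    pvStepA best hand = pvStepFn best
      (PySem.List.sorted (PySem.Set.ofList (hand.toList.map (fun card => (card, pvCnt hand card)))) (fun card => card.2) true).length
      ((PySem.List.pyGetD (PySem.List.sorted (PySem.Set.ofList (hand.toList.map (fun card => (card, pvCnt hand card)))) (fun card => card.2) true) 0 ('?', 0)).2) := rfl

set_option maxHeartbeats 1000000 in
theorem pvStepFn_eq (best : String × Int) (L : Nat) (hc : Int) :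
    pvStepFn best L hc =
      (if shapeRank ((L : Int), hc) ≠ 0 ∧ best.2 ≤ shapeRank ((L : Int), hc) then
        (pvName (shapeRank ((L : Int), hc)), shapeRank ((L : Int), hc)) else best) := by
  unfold pvStepFn shapeRank pvName
  rcases L with _ | _ | _ | _ | _ | _ | n
  all_goals try norm_num
  all_goals try split_ifs
  all_goals first | rfl | omega

set_option maxHeartbeats 1000000 in
-- on a non-empty hand, A's loop body is exactly "update the best with B's rank"
theorem pv_step_eq (best : String × Int) (hand : String) (h : hand ≠ "") :
    pvStepA best hand =
      (if pvRank hand ≠ 0 ∧ best.2 ≤ pvRank hand then (pvName (pvRank hand), pvRank hand) else best) := by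
  have htl : hand.toList ≠ [] := by
    intro hl; apply h; cases hand; simp_all
  have hcne : PySem.Set.ofList hand.toList ≠ ([] : List Char) := by
    cases hl : hand.toList with
    | nil => exact absurd hl htl
    | cons a t =>
      exact List.ne_nil_of_mem ((PySem.Set.mem_ofList (a :: t) a).mpr List.mem_cons_self)
  have hLne : (PySem.Set.ofList hand.toList : List Char).map (fun card => (card, pvCnt hand card)) ≠ [] := by
    simpa using hcne
  obtain ⟨m, t, hsort⟩ : ∃ m t, PySem.List.sorted ((PySem.Set.ofList hand.toList : List Char).map (fun card => (card, pvCnt hand card))) (fun card => card.2) true = m :: t := by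
    cases hs : PySem.List.sorted ((PySem.Set.ofList hand.toList : List Char).map (fun card => (card, pvCnt hand card))) (fun card => card.2) true with
    | nil => exact absurd ((PySem.List.sorted_eq_nil_iff _ _ _).mp hs) hLne
    | cons a b => exact ⟨a, b, rfl⟩
  have hlen : (m :: t).length = (PySem.Set.ofList hand.toList : List Char).length := by
    rw [← hsort, PySem.List.length_sorted, List.length_map]
  have hmax : ∃ mb, PySem.List.max? ((PySem.Set.ofList hand.toList : List Char).map (fun card => pvCnt hand card)) (fun x => x) = some mb := by
    cases hs : PySem.List.max? ((PySem.Set.ofList hand.toList : List Char).map (fun card => pvCnt hand card)) (fun x => x) with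
    | none => exact absurd (by simpa using (PySem.List.max?_eq_none_iff _ _).mp hs) hcne
    | some mb => exact ⟨mb, rfl⟩
  obtain ⟨mb, hmb⟩ := hmax
  -- the head of the reverse-sorted pair list carries the maximal count
  have hm2 : m.2 = mb := by
    have hmem_m : m ∈ (PySem.Set.ofList hand.toList : List Char).map (fun card => (card, pvCnt hand card)) := by
      rw [← PySem.List.mem_sorted _ (fun card => card.2) true, hsort]; exact List.mem_cons_self
    obtain ⟨c0, hc0, hc0e⟩ := List.mem_map.mp hmem_m
    have h1 : m.2 ≤ mb := by
      have hv : pvCnt hand c0 ∈ (PySem.Set.ofList hand.toList : List Char).map (fun card => pvCnt hand card) :=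
        List.mem_map.mpr ⟨c0, hc0, rfl⟩
      have hle := PySem.List.max?_isMax hmb _ hv
      rw [← hc0e]
      exact hle
    have h2 : mb ≤ m.2 := by
      have hmbmem := PySem.List.max?_mem hmb
      obtain ⟨c1, hc1, hc1e⟩ := List.mem_map.mp hmbmem
      have : (c1, pvCnt hand c1) ∈ (PySem.Set.ofList hand.toList : List Char).map (fun card => (card, pvCnt hand card)) :=
        List.mem_map.mpr ⟨c1, hc1, rfl⟩
      have := PySem.List.key_head_sorted_rev_ge _ _ hsort _ this
      simpa [hc1e] using this
    omega
  have hshape : pvShape hand = ((((m :: t).length : Int)), mb) := by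
    simp only [pvShape, hmb, Option.getD_some]
    rw [hlen.symm]
  have hr : pvRank hand = shapeRank (((m :: t).length : Int), mb) := by
    unfold pvRank
    rw [hshape]
  have hget : (PySem.List.pyGetD (m :: t) 0 ('?', 0)) = m := by
    simp [PySem.List.pyGetD, PySem.List.pyGet?, PySem.List.pyIdx?]
  rw [pvStepA_eq_fn best hand, pv_set_map, hsort, hget, hm2, hr]
  exact pvStepFn_eq best (m :: t).length mb

theorem shapeRank_bounds (s : Int × Int) : 0 ≤ shapeRank s ∧ shapeRank s ≤ 7 := by
  unfold shapeRank
  split_ifs <;> norm_num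

theorem pv_fold (hands : List String) (hp : ∀ h ∈ hands, h ≠ "") (M : Int) (h0 : 0 ≤ M) :
    hands.foldl pvStepA (pvName M, M) =
      (pvName (hands.foldl (fun a h => max a (pvRank h)) M),
       hands.foldl (fun a h => max a (pvRank h)) M) := by
  induction hands generalizing M with
  | nil => rfl
  | cons h t ih =>
    have hne : h ≠ "" := hp h (by simp)
    have hstep : pvStepA (pvName M, M) h = (pvName (max M (pvRank h)), max M (pvRank h)) := by
      rw [pv_step_eq _ _ hne]
      by_cases h0r : pvRank h = 0
      · simp [h0r, max_eq_left h0]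
      · by_cases hle : M ≤ pvRank h
        · simp [h0r, hle]
        · simp [h0r, hle, max_eq_left (le_of_not_ge hle)]
    simp only [List.foldl_cons, hstep]
    exact ih (fun x hx => hp x (by simp [hx])) _ (le_trans h0 (le_max_left _ _))

-- generic facts about a foldl running maximum
theorem pv_fmax_ge {α : Type} (f : α → Int) (l : List α) : ∀ (a : Int),
    a ≤ l.foldl (fun b x => max b (f x)) a := by
  induction l with
  | nil => intro a; simp
  | cons x t ih => intro a; exact le_trans (le_max_left _ _) (ih _)

theorem pv_fmax_ub {α : Type} (f : α → Int) (l : List α) : ∀ (a : Int) (x : α), x ∈ l →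
    f x ≤ l.foldl (fun b x => max b (f x)) a := by
  induction l with
  | nil => intro a x hx; cases hx
  | cons y t ih =>
    intro a x hx
    rcases List.mem_cons.mp hx with h | h
    · subst h; exact le_trans (le_max_right _ _) (pv_fmax_ge f t _)
    · exact ih _ x h

theorem pv_fmax_at {α : Type} (f : α → Int) (l : List α) : ∀ (a : Int),
    l.foldl (fun b x => max b (f x)) a = a ∨ ∃ x ∈ l, l.foldl (fun b x => max b (f x)) a = f x := by
  induction l with
  | nil => intro a; exact Or.inl rfl
  | cons y t ih =>
    intro a
    rcases ih (max a (f y)) with h | ⟨x, hx, he⟩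
    · by_cases hya : f y ≤ a
      · left; simpa [max_eq_left hya] using h
      · right
        exact ⟨y, List.mem_cons_self, by simpa [max_eq_right (le_of_not_ge hya)] using h⟩
    · exact Or.inr ⟨x, List.mem_cons_of_mem _ hx, he⟩

theorem pv_fmax_mem {α : Type} (f : α → Int) (l1 l2 : List α) (h : ∀ x, x ∈ l1 ↔ x ∈ l2) :
    l1.foldl (fun b x => max b (f x)) 0 = l2.foldl (fun b x => max b (f x)) 0 := by
  have H : ∀ (p q : List α), (∀ x ∈ p, x ∈ q) →
      p.foldl (fun b x => max b (f x)) 0 ≤ q.foldl (fun b x => max b (f x)) 0 := by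
    intro p q hpq
    rcases pv_fmax_at f p 0 with h0 | ⟨x, hx, he⟩
    · rw [h0]; exact pv_fmax_ge f q 0
    · rw [he]; exact pv_fmax_ub f q 0 x (hpq x hx)
  exact le_antisymm (H _ _ fun x hx => (h x).mp hx) (H _ _ fun x hx => (h x).mpr hx)

-- each table entry's match predicate holds for a shape iff that shape has the entry's rank
theorem pvMatch_iff_rank (sh : List (Int × Int)) (n : Int) (m : Option Int) (r : Int)
    (hpt : ∀ s : Int × Int, (s.1 = n ∧ (m = none ∨ m = some s.2)) ↔ shapeRank s = r) :
    pvMatch sh n m = true ↔ ∃ s ∈ sh, shapeRank s = r := by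
  unfold pvMatch
  rw [List.any_eq_true]
  refine exists_congr fun s => and_congr_right fun _ => ?_
  rw [← hpt s]
  cases m <;> simp

theorem pt7 (s : Int × Int) : (s.1 = 1 ∧ ((none : Option Int) = none ∨ (none : Option Int) = some s.2)) ↔ shapeRank s = 7 := by
  unfold shapeRank
  constructor
  · rintro ⟨h1, -⟩; split_ifs <;> omega
  · intro hr; refine ⟨?_, Or.inl rfl⟩; split_ifs at hr <;> omega

theorem pt6 (s : Int × Int) : (s.1 = 2 ∧ ((some (4 : Int) : Option Int) = none ∨ (some (4 : Int) : Option Int) = some s.2)) ↔ shapeRank s = 6 := by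
  unfold shapeRank
  constructor
  · rintro ⟨h1, h2 | h2⟩
    · exact absurd h2 (by simp)
    · injection h2 with h2; split_ifs <;> omega
  · intro hr
    have hnm : s.1 = 2 ∧ s.2 = 4 := by split_ifs at hr <;> omega
    exact ⟨hnm.1, Or.inr (by rw [hnm.2])⟩

theorem pt5 (s : Int × Int) : (s.1 = 2 ∧ ((some (3 : Int) : Option Int) = none ∨ (some (3 : Int) : Option Int) = some s.2)) ↔ shapeRank s = 5 := by
  unfold shapeRank
  constructor
  · rintro ⟨h1, h2 | h2⟩
    · exact absurd h2 (by simp)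
    · injection h2 with h2; split_ifs <;> omega
  · intro hr
    have hnm : s.1 = 2 ∧ s.2 = 3 := by split_ifs at hr <;> omega
    exact ⟨hnm.1, Or.inr (by rw [hnm.2])⟩

theorem pt4 (s : Int × Int) : (s.1 = 3 ∧ ((some (3 : Int) : Option Int) = none ∨ (some (3 : Int) : Option Int) = some s.2)) ↔ shapeRank s = 4 := by
  unfold shapeRank
  constructor
  · rintro ⟨h1, h2 | h2⟩
    · exact absurd h2 (by simp)
    · injection h2 with h2; split_ifs <;> omega
  · intro hr
    have hnm : s.1 = 3 ∧ s.2 = 3 := by split_ifs at hr <;> omega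
    exact ⟨hnm.1, Or.inr (by rw [hnm.2])⟩

theorem pt3 (s : Int × Int) : (s.1 = 3 ∧ ((some (2 : Int) : Option Int) = none ∨ (some (2 : Int) : Option Int) = some s.2)) ↔ shapeRank s = 3 := by
  unfold shapeRank
  constructor
  · rintro ⟨h1, h2 | h2⟩
    · exact absurd h2 (by simp)
    · injection h2 with h2; split_ifs <;> omega
  · intro hr
    have hnm : s.1 = 3 ∧ s.2 = 2 := by split_ifs at hr <;> omega
    exact ⟨hnm.1, Or.inr (by rw [hnm.2])⟩

theorem pt2 (s : Int × Int) : (s.1 = 4 ∧ ((none : Option Int) = none ∨ (none : Option Int) = some s.2)) ↔ shapeRank s = 2 := by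
  unfold shapeRank
  constructor
  · rintro ⟨h1, -⟩; split_ifs <;> omega
  · intro hr; refine ⟨?_, Or.inl rfl⟩; split_ifs at hr <;> omega

theorem pt1 (s : Int × Int) : (s.1 = 5 ∧ ((none : Option Int) = none ∨ (none : Option Int) = some s.2)) ↔ shapeRank s = 1 := by
  unfold shapeRank
  constructor
  · rintro ⟨h1, -⟩; split_ifs <;> omega
  · intro hr; refine ⟨?_, Or.inl rfl⟩; split_ifs at hr <;> omega

theorem pv_scan_eq (sh : List (Int × Int)) :
    pvScan sh pvTable = pvName (sh.foldl (fun a s => max a (shapeRank s)) 0) := by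
  have hub : ∀ s ∈ sh, shapeRank s ≤ sh.foldl (fun a s => max a (shapeRank s)) 0 :=
    fun s hs => pv_fmax_ub shapeRank sh 0 s hs
  have hat := pv_fmax_at shapeRank sh 0
  have h0 : 0 ≤ sh.foldl (fun a s => max a (shapeRank s)) 0 := pv_fmax_ge shapeRank sh 0
  have h7 : sh.foldl (fun a s => max a (shapeRank s)) 0 ≤ 7 := by
    rcases pv_fmax_at shapeRank sh 0 with h | ⟨x, _, he⟩
    · rw [h]; norm_num
    · rw [he]; exact (shapeRank_bounds x).2
  generalize hMg : sh.foldl (fun a s => max a (shapeRank s)) 0 = M at hub hat h0 h7 ⊢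
  have e7 := pvMatch_iff_rank sh 1 none 7 pt7
  have e6 := pvMatch_iff_rank sh 2 (some 4) 6 pt6
  have e5 := pvMatch_iff_rank sh 2 (some 3) 5 pt5
  have e4 := pvMatch_iff_rank sh 3 (some 3) 4 pt4
  have e3 := pvMatch_iff_rank sh 3 (some 2) 3 pt3
  have e2 := pvMatch_iff_rank sh 4 none 2 pt2
  have e1 := pvMatch_iff_rank sh 5 none 1 pt1
  have n : ∀ (b : Bool) (r : Int), (b = true ↔ ∃ s ∈ sh, shapeRank s = r) → M < r → ¬ b = true :=
    fun b r hiff hr hb => by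
      rcases hiff.mp hb with ⟨s, hs, he⟩
      exact absurd (hub s hs) (by omega)
  have p : ∀ (b : Bool) (r : Int), (b = true ↔ ∃ s ∈ sh, shapeRank s = r) → M = r → r ≠ 0 → b = true :=
    fun b r hiff hMr hr0 => by
      rcases hat with h | ⟨x, hx, he⟩
      · omega
      · exact hiff.mpr ⟨x, hx, by omega⟩
  simp only [pvScan, pvTable]
  interval_cases M
  · rw [if_neg (n _ _ e7 (by norm_num)), if_neg (n _ _ e6 (by norm_num)),
        if_neg (n _ _ e5 (by norm_num)), if_neg (n _ _ e4 (by norm_num)),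
        if_neg (n _ _ e3 (by norm_num)), if_neg (n _ _ e2 (by norm_num)),
        if_neg (n _ _ e1 (by norm_num))]
    rfl
  · rw [if_neg (n _ _ e7 (by norm_num)), if_neg (n _ _ e6 (by norm_num)),
        if_neg (n _ _ e5 (by norm_num)), if_neg (n _ _ e4 (by norm_num)),
        if_neg (n _ _ e3 (by norm_num)), if_neg (n _ _ e2 (by norm_num)),
        if_pos (p _ _ e1 rfl (by norm_num))]
    rfl
  · rw [if_neg (n _ _ e7 (by norm_num)), if_neg (n _ _ e6 (by norm_num)),
        if_neg (n _ _ e5 (by norm_num)), if_neg (n _ _ e4 (by norm_num)),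
        if_neg (n _ _ e3 (by norm_num)), if_pos (p _ _ e2 rfl (by norm_num))]
    rfl
  · rw [if_neg (n _ _ e7 (by norm_num)), if_neg (n _ _ e6 (by norm_num)),
        if_neg (n _ _ e5 (by norm_num)), if_neg (n _ _ e4 (by norm_num)),
        if_pos (p _ _ e3 rfl (by norm_num))]
    rfl
  · rw [if_neg (n _ _ e7 (by norm_num)), if_neg (n _ _ e6 (by norm_num)),
        if_neg (n _ _ e5 (by norm_num)), if_pos (p _ _ e4 rfl (by norm_num))]
    rfl
  · rw [if_neg (n _ _ e7 (by norm_num)), if_neg (n _ _ e6 (by norm_num)),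
        if_pos (p _ _ e5 rfl (by norm_num))]
    rfl
  · rw [if_neg (n _ _ e7 (by norm_num)), if_pos (p _ _ e6 rfl (by norm_num))]
    rfl
  · rw [if_pos (p _ _ e7 rfl (by norm_num))]
    rfl

-- B builds its shape set exactly as set() of the mapped hand list
theorem pv_shapes_eq (hands : List String) :
    hands.foldl (fun shapes hand => PySem.Set.add shapes (pvShape hand)) [] =
      PySem.Set.ofList (hands.map pvShape) := by
  unfold PySem.Set.ofList
  rw [List.foldl_map]
  rfl

-- ===== VERDICT (by name: the statement is the Claim_ definition above) =====
theorem compare_hand_type_spec : Claim_equal_compare_hand_type := by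
  intro hands _ hpre
  unfold Spec_compare_hand_type compare_hand_type compare_hand_type_alt
  rw [show (("", (0 : Int)) : String × Int) = (pvName 0, 0) by norm_num [pvName],
      pv_fold hands hpre 0 le_rfl, pv_shapes_eq, pv_scan_eq,
      pv_fmax_mem shapeRank _ (hands.map pvShape) (fun x => PySem.Set.mem_ofList _ x),
      List.foldl_map]
  rfl
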